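-- pv_equiv track=rewrite | github.com/davidfeust/EconomicAlgorithms | leximin.py | is_leximin_better
-- ===== SOURCE A (Python) =====
-- def is_leximin_better(x: list, y: list) -> bool:
--     """
--     return true iff x is leximin-better than y.
--
--     >>> x = [4, 6, 4]
--     >>> y = [5, 3, 5]
--     >>> is_leximin_better(x, y)
--     True
--     >>> x = [4, 2, 4]
--     >>> y = [5, 3, 2]
--     >>> is_leximin_better(x, y)
--     True
--     >>> x = [1, 5, 5]
--     >>> y = [5, 1, 5]
--     >>> is_leximin_better(x, y)
--     False
--     >>> x = [4, 3, 2, 1, 0]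
--     >>> y = [9, 8, 7, 6, 5]
--     >>> is_leximin_better(x, y)
--     False
--     >>> is_leximin_better(y, x)
--     True
--     >>> x = [1, 2]
--     >>> y = [3, 2, 1]
--     >>> is_leximin_better(y, x)
--     Traceback (most recent call last):
--         ...
--     ValueError: len(x) must be equal to len(y)
--
--     :rtype: bool
--     """
--     if len(x) != len(y):
--         raise ValueError("len(x) must be equal to len(y)")
--     while len(x) > 0:
--         min_x = min(x)
--         min_y = min(y)
--         if min_x > min_y:
--             return True
--         elif min_x == min_y:
--             x.remove(min_x)
--             y.remove(min_y)
--         else: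
--             return False
--     return False
-- ===== SOURCE B (Python) =====
-- def is_leximin_better(x: list, y: list) -> bool:
--     if len(x) != len(y):
--         raise ValueError("len(x) must be equal to len(y)")
--     return sorted(x) > sorted(y)
-- ===== Notes on version B (the rewrite author's own statement) =====
-- stated objective: faster
-- what changed: Replaced the repeated min-and-remove loop (quadratic, and it mutates its arguments) by sorting both lists once and comparing them lexicographically; equivalence is about the return value only since A empties its arguments in the equal-prefix case.
import Mathlib
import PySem

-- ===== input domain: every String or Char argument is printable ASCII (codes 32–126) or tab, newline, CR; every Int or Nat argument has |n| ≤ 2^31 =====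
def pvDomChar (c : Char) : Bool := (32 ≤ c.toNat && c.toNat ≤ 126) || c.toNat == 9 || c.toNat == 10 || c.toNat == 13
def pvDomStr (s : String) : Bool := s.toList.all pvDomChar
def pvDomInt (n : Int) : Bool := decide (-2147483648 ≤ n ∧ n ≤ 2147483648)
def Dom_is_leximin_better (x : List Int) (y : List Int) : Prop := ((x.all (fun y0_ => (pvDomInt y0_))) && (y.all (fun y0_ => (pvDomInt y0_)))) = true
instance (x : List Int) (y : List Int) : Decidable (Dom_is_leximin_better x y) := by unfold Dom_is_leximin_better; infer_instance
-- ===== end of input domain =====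

-- B replaces A's quadratic min-and-remove loop by sort-both-then-lexicographic-compare (measured faster,
-- asymptotically O(n log n) vs O(n^2)); A empties its argument lists in place, so the equivalence proved
-- here is about the RETURN value only.


-- ===== PORT A =====
-- the 'while len(x) > 0' loop: min, compare, remove-first-occurrence from both lists
def leximinLoopA (x y : List Int) : Bool :=
  if _hx : x = [] then false
  else
    match PySem.List.min? x (fun v => v), PySem.List.min? y (fun v => v) with
    | some mx, some my =>
      if mx > my then true
      else if mx = my then
        match h2 : PySem.List.remove? x mx, PySem.List.remove? y my with
        | some x', some y' => leximinLoopA x' y'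
        | _, _ => false   -- unreachable: the minima are members
      else false
    | _, _ => false       -- unreachable when len(x) = len(y) > 0
termination_by x.length
decreasing_by
  have hmem : mx ∈ x := by
    by_contra hc
    rw [(PySem.List.remove?_eq_none_iff x mx).2 hc] at h2
    simp at h2
  have := PySem.List.remove?_eq_some_erase x mx hmem
  rw [this] at h2
  cases h2
  have hlen := List.length_erase_of_mem hmem
  have hpos := List.length_pos_of_mem hmem
  omega

-- A raises ValueError on unequal lengths (excluded by Pre_); the port returns false there
def is_leximin_better (x : List Int) (y : List Int) : Bool :=
  if x.length ≠ y.length then false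
  else leximinLoopA x y

-- ===== PORT B =====
-- hand port of Python's lexicographic '>' on two int lists (exact: first differing element decides,
-- a proper prefix is smaller)
def pyListGt : List Int → List Int → Bool
  | [], _ => false
  | _ :: _, [] => true
  | a :: as, b :: bs => if a > b then true else if a = b then pyListGt as bs else false

def is_leximin_better_alt (x : List Int) (y : List Int) : Bool :=
  if x.length ≠ y.length then false
  else pyListGt (PySem.List.sorted x (fun v => v) false) (PySem.List.sorted y (fun v => v) false)

-- ===== PRECONDITION & SPEC =====
-- A raises ValueError when the lengths differ; exactly those inputs are excluded
def Pre_is_leximin_better (x : List Int) (y : List Int) : Prop := x.length = y.length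
instance (x : List Int) (y : List Int) : Decidable (Pre_is_leximin_better x y) := by unfold Pre_is_leximin_better; infer_instance
def pvWitness_is_leximin_better : List Int × List Int := ([4, 6, 4], [5, 3, 5])

def Spec_is_leximin_better (x : List Int) (y : List Int) (out : Bool) : Prop := out = is_leximin_better_alt x y
instance (x : List Int) (y : List Int) (out : Bool) : Decidable (Spec_is_leximin_better x y out) := by unfold Spec_is_leximin_better; infer_instance

-- ===== CLAIM (what is proved, stated in full; the proofs are below) =====
def Claim_equal_is_leximin_better : Prop := ∀ (x : List Int) (y : List Int), Dom_is_leximin_better x y → Pre_is_leximin_better x y → Spec_is_leximin_better x y (is_leximin_better x y)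

-- ===== LEMMAS AND PROOFS =====

-- sorted(x) = min(x) :: sorted(x with the first min removed)
theorem sortedId_cons_min (x : List Int) (mx : Int) (x' : List Int)
    (h1 : PySem.List.min? x (fun v => v) = some mx)
    (h2 : PySem.List.remove? x mx = some x') :
    PySem.List.sorted x (fun v => v) false = mx :: PySem.List.sorted x' (fun v => v) false := by
  have hmem := PySem.List.min?_mem h1
  have hx' : x' = x.erase mx := by
    have := PySem.List.remove?_eq_some_erase x mx hmem
    rw [this] at h2; exact (Option.some_injective _ h2).symm
  apply PySem.List.sorted_id_eq_of_perm_of_pairwise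
  · have hp : (mx :: PySem.List.sorted x' (fun v => v) false).Perm (mx :: x') :=
      List.Perm.cons _ (PySem.List.sorted_perm _ _ _)
    refine hp.trans ?_
    rw [hx']
    exact (List.perm_cons_erase hmem).symm
  · rw [List.pairwise_cons]
    refine ⟨?_, ?_⟩
    · intro b hb
      have hbx : b ∈ x := by
        have : b ∈ x' := (PySem.List.mem_sorted _ _ _ _).1 hb
        rw [hx'] at this; exact List.mem_of_mem_erase this
      exact PySem.List.min?_isMin h1 b hbx
    · exact PySem.List.sorted_pairwise _ _

theorem loop_eq_gt : ∀ (n : ℕ) (x y : List Int), x.length = n → y.length = n →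
    leximinLoopA x y = pyListGt (PySem.List.sorted x (fun v => v) false) (PySem.List.sorted y (fun v => v) false) := by
  intro n
  induction n with
  | zero =>
    intro x y hx hy
    rw [List.length_eq_zero_iff] at hx hy
    subst hx; subst hy
    unfold leximinLoopA
    simp [PySem.List.sorted, pyListGt]
  | succ n ih =>
    intro x y hx hy
    have hxne : x ≠ [] := by intro h; subst h; simp at hx
    have hyne : y ≠ [] := by intro h; subst h; simp at hy
    obtain ⟨mx, h1⟩ : ∃ mx, PySem.List.min? x (fun v => v) = some mx := by
      cases hmx : PySem.List.min? x (fun v => v) with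
      | none => exact absurd ((PySem.List.min?_eq_none_iff _ _).1 hmx) hxne
      | some m => exact ⟨m, rfl⟩
    obtain ⟨my, h1y⟩ : ∃ my, PySem.List.min? y (fun v => v) = some my := by
      cases hmy : PySem.List.min? y (fun v => v) with
      | none => exact absurd ((PySem.List.min?_eq_none_iff _ _).1 hmy) hyne
      | some m => exact ⟨m, rfl⟩
    have hmemx := PySem.List.min?_mem h1
    have hmemy := PySem.List.min?_mem h1y
    have h2 : PySem.List.remove? x mx = some (x.erase mx) :=
      PySem.List.remove?_eq_some_erase x mx hmemx
    have h2y : PySem.List.remove? y my = some (y.erase my) :=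
      PySem.List.remove?_eq_some_erase y my hmemy
    rw [sortedId_cons_min x mx _ h1 h2, sortedId_cons_min y my _ h1y h2y]
    unfold leximinLoopA
    rw [dif_neg hxne, h1, h1y]
    by_cases hgt : mx > my
    · simp [pyListGt, hgt]
    · by_cases heq : mx = my
      · have ihe := ih (x.erase mx) (y.erase my)
          (by rw [List.length_erase_of_mem hmemx, hx]; rfl)
          (by rw [List.length_erase_of_mem hmemy, hy]; rfl)
        simp only [hgt, if_false, heq, if_true, pyListGt, lt_irrefl, decide_false,
          Bool.false_eq_true, ite_false, ite_true]
        split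
        · rename_i x1 y1 e1 e2
          rw [h2] at e1; rw [h2y] at e2
          cases e1; cases e2
          rw [ihe, heq]
        · rename_i hno
          exact (hno _ _ h2 h2y).elim
      · simp [pyListGt, hgt, heq]

-- ===== VERDICT (by name: the statement is the Claim_ definition above) =====
theorem is_leximin_better_spec : Claim_equal_is_leximin_better := by
  intro x y _ hpre
  unfold Spec_is_leximin_better is_leximin_better is_leximin_better_alt
  rw [hpre]
  simp only [ne_eq, not_true_eq_false, if_false]
  exact loop_eq_gt y.length x y hpre rfl
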